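-- pv_equiv track=rewrite | github.com/XiaoZhangYES/CognitionCapturerPro | src/cogcappro/data/meg.py | categorize_channels_by_third_letter
-- ===== SOURCE A (Python) =====
-- def categorize_channels_by_third_letter(channels):
--     """
--     Categorize channels into different lists based on the third letter
--
--     Args:
--         channels: List of channel names
--
--     Returns:
--         dict: Dictionary of channel lists categorized by third letter
--     """
--     categories = {
--         'C': [],
--         'F': [],
--         'O': [],
--         'P': [],
--         'T': []
--     }
--
--     for channel in channels:
--         if len(channel) >= 3:
--             third_letter = channel[2]
--             if third_letter in categories:
--                 categories[third_letter].append(channel)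
--
--     return categories
-- ===== SOURCE B (Python) =====
-- def categorize_channels_by_third_letter(channels):
--     """
--     Categorize channels into different lists based on the third letter
--
--     Args:
--         channels: List of channel names
--
--     Returns:
--         dict: Dictionary of channel lists categorized by third letter
--     """
--     return {letter: [c for c in channels if len(c) >= 3 and c[2] == letter]
--             for letter in 'CFOPT'}
-- ===== Notes on version B (the rewrite author's own statement) =====
-- stated objective: idiomatic
-- what changed: Replaces the pre-seeded dict plus single dispatch-and-append pass with a dict comprehension over the fixed letters 'CFOPT', each bucket computed by its own independent filtering comprehension over the input.
import Mathlib
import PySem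

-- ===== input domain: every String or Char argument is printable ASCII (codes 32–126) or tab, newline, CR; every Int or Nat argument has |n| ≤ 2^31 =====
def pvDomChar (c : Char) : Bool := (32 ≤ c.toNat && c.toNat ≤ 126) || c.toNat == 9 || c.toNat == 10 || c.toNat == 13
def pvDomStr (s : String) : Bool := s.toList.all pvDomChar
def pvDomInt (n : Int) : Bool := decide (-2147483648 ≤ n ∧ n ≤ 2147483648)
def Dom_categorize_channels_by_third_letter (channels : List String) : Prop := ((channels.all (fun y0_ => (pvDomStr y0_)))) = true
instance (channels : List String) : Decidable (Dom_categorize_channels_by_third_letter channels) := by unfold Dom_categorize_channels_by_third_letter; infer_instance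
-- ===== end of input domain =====

-- B is the same grouping written as a dict comprehension over the fixed letters 'CFOPT', one filtering scan per bucket (idiomatic; not faster).
-- ===== PORT A =====
def catStepA (d : PySem.Dict String (List String)) (channel : String) : PySem.Dict String (List String) :=
  if 3 ≤ PySem.Str.len channel then
    match PySem.Str.pyGet? channel 2 with
    | some t =>
        let third_letter := String.ofList [t]
        if d.contains third_letter then d.modify third_letter [] (fun xs => xs ++ [channel]) else d
    | none => d
  else d

def categorize_channels_by_third_letter (channels : List String) : List (String × List String) :=
  (channels.foldl catStepA
    (PySem.Dict.ofList [("C", []), ("F", []), ("O", []), ("P", []), ("T", [])])).items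

-- ===== PORT B =====
def predB (letter : Char) (c : String) : Bool :=
  decide (3 ≤ PySem.Str.len c) && (PySem.Str.pyGet? c 2 == some letter)

def categorize_channels_by_third_letter_alt (channels : List String) : List (String × List String) :=
  ['C', 'F', 'O', 'P', 'T'].map (fun letter => (String.ofList [letter], channels.filter (predB letter)))

-- ===== PRECONDITION & SPEC =====
def Spec_categorize_channels_by_third_letter (channels : List String) (out : List (String × List String)) : Prop := out = categorize_channels_by_third_letter_alt channels
instance (channels : List String) (out : List (String × List String)) : Decidable (Spec_categorize_channels_by_third_letter channels out) := by unfold Spec_categorize_channels_by_third_letter; infer_instance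

-- ===== CLAIM (what is proved, stated in full; the proofs are below) =====
def Claim_equal_categorize_channels_by_third_letter : Prop := ∀ (channels : List String), Dom_categorize_channels_by_third_letter channels → Spec_categorize_channels_by_third_letter channels (categorize_channels_by_third_letter channels)

-- ===== LEMMAS AND PROOFS =====
lemma catA_inv (l : List String) (a b c d e : List String) :
    (l.foldl catStepA (PySem.Dict.mk [("C", a), ("F", b), ("O", c), ("P", d), ("T", e)])).items
    = [("C", a ++ l.filter (predB 'C')), ("F", b ++ l.filter (predB 'F')),
       ("O", c ++ l.filter (predB 'O')), ("P", d ++ l.filter (predB 'P')),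
       ("T", e ++ l.filter (predB 'T'))] := by
  induction l generalizing a b c d e with
  | nil => simp
  | cons x xs ih =>
    simp only [List.foldl_cons, List.filter_cons]
    by_cases hlen : 3 ≤ PySem.Str.len x
    · cases hget : PySem.Str.pyGet? x 2 with
      | none =>
        exfalso
        simp [pysem, PySem.Chars.pyGet?, String.length_toList] at hget hlen
        omega
      | some t =>
        have hget' : PySem.List.pyGet? x.toList 2 = some t := by simpa [pysem] using hget
        have hlen' : 3 ≤ x.length := by simpa [pysem, String.length_toList] using hlen
        have hpt : predB t x = true := by simp [predB, pysem, hget', hlen']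
        have hpne : ∀ L, t ≠ L → predB L x = false := by
          intro L hne
          simp [predB, pysem, hget']
          intro _ hh
          exact hne hh
        by_cases hC : t = 'C'
        · subst hC
          rw [show catStepA (PySem.Dict.mk [("C", a), ("F", b), ("O", c), ("P", d), ("T", e)]) x
              = PySem.Dict.mk [("C", a ++ [x]), ("F", b), ("O", c), ("P", d), ("T", e)] from by
            simp [catStepA, hlen', hget', PySem.Dict.contains, PySem.Dict.modify, PySem.Dict.insert,
                  PySem.Dict.getD, PySem.Dict.get?, show ("C":String) = String.ofList ['C'] from rfl]]
          rw [ih]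
          simp [hpt, hpne 'F' (by decide), hpne 'O' (by decide), hpne 'P' (by decide), hpne 'T' (by decide), List.append_assoc]
        by_cases hF : t = 'F'
        · subst hF
          rw [show catStepA (PySem.Dict.mk [("C", a), ("F", b), ("O", c), ("P", d), ("T", e)]) x
              = PySem.Dict.mk [("C", a), ("F", b ++ [x]), ("O", c), ("P", d), ("T", e)] from by
            simp [catStepA, hlen', hget', PySem.Dict.contains, PySem.Dict.modify, PySem.Dict.insert,
                  PySem.Dict.getD, PySem.Dict.get?, show ("F":String) = String.ofList ['F'] from rfl]]
          rw [ih]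
          simp [hpt, hpne 'C' (by decide), hpne 'O' (by decide), hpne 'P' (by decide), hpne 'T' (by decide), List.append_assoc]
        by_cases hO : t = 'O'
        · subst hO
          rw [show catStepA (PySem.Dict.mk [("C", a), ("F", b), ("O", c), ("P", d), ("T", e)]) x
              = PySem.Dict.mk [("C", a), ("F", b), ("O", c ++ [x]), ("P", d), ("T", e)] from by
            simp [catStepA, hlen', hget', PySem.Dict.contains, PySem.Dict.modify, PySem.Dict.insert,
                  PySem.Dict.getD, PySem.Dict.get?, show ("O":String) = String.ofList ['O'] from rfl]]
          rw [ih]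
          simp [hpt, hpne 'C' (by decide), hpne 'F' (by decide), hpne 'P' (by decide), hpne 'T' (by decide), List.append_assoc]
        by_cases hP : t = 'P'
        · subst hP
          rw [show catStepA (PySem.Dict.mk [("C", a), ("F", b), ("O", c), ("P", d), ("T", e)]) x
              = PySem.Dict.mk [("C", a), ("F", b), ("O", c), ("P", d ++ [x]), ("T", e)] from by
            simp [catStepA, hlen', hget', PySem.Dict.contains, PySem.Dict.modify, PySem.Dict.insert,
                  PySem.Dict.getD, PySem.Dict.get?, show ("P":String) = String.ofList ['P'] from rfl]]
          rw [ih]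
          simp [hpt, hpne 'C' (by decide), hpne 'F' (by decide), hpne 'O' (by decide), hpne 'T' (by decide), List.append_assoc]
        by_cases hT : t = 'T'
        · subst hT
          rw [show catStepA (PySem.Dict.mk [("C", a), ("F", b), ("O", c), ("P", d), ("T", e)]) x
              = PySem.Dict.mk [("C", a), ("F", b), ("O", c), ("P", d), ("T", e ++ [x])] from by
            simp [catStepA, hlen', hget', PySem.Dict.contains, PySem.Dict.modify, PySem.Dict.insert,
                  PySem.Dict.getD, PySem.Dict.get?, show ("T":String) = String.ofList ['T'] from rfl]]
          rw [ih]
          simp [hpt, hpne 'C' (by decide), hpne 'F' (by decide), hpne 'O' (by decide), hpne 'P' (by decide), List.append_assoc]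
        have hC' : ¬ ("C":String) = String.ofList [t] := fun h => hC (by
          have h2 := congrArg String.toList h; simp at h2; exact h2.symm)
        have hF' : ¬ ("F":String) = String.ofList [t] := fun h => hF (by
          have h2 := congrArg String.toList h; simp at h2; exact h2.symm)
        have hO' : ¬ ("O":String) = String.ofList [t] := fun h => hO (by
          have h2 := congrArg String.toList h; simp at h2; exact h2.symm)
        have hP' : ¬ ("P":String) = String.ofList [t] := fun h => hP (by
          have h2 := congrArg String.toList h; simp at h2; exact h2.symm)
        have hT' : ¬ ("T":String) = String.ofList [t] := fun h => hT (by
          have h2 := congrArg String.toList h; simp at h2; exact h2.symm)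
        rw [show catStepA (PySem.Dict.mk [("C", a), ("F", b), ("O", c), ("P", d), ("T", e)]) x
            = PySem.Dict.mk [("C", a), ("F", b), ("O", c), ("P", d), ("T", e)] from by
          simp [catStepA, hlen', hget', PySem.Dict.contains, hC', hF', hO', hP', hT']]
        rw [ih]
        simp [hpne 'C' hC, hpne 'F' hF, hpne 'O' hO, hpne 'P' hP, hpne 'T' hT]
    · have hp : ∀ L, predB L x = false := by
        intro L
        simp [predB, pysem, String.length_toList]
        intro h
        exact absurd (by simpa [pysem, String.length_toList] using h) hlen
      rw [show catStepA (PySem.Dict.mk [("C", a), ("F", b), ("O", c), ("P", d), ("T", e)]) x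
          = PySem.Dict.mk [("C", a), ("F", b), ("O", c), ("P", d), ("T", e)] from by
        simp only [catStepA, if_neg hlen]]
      rw [ih]
      simp [hp]

-- ===== VERDICT (by name: the statement is the Claim_ definition above) =====
theorem categorize_channels_by_third_letter_spec : Claim_equal_categorize_channels_by_third_letter := by
  intro channels _
  show _ = _
  unfold categorize_channels_by_third_letter categorize_channels_by_third_letter_alt
  rw [show (PySem.Dict.ofList [("C", ([] : List String)), ("F", []), ("O", []), ("P", []), ("T", [])]) = PySem.Dict.mk [("C", []), ("F", []), ("O", []), ("P", []), ("T", [])] from by decide]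
  rw [catA_inv]
  rfl
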